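-- pv_equiv track=rewrite | github.com/Leapense/problems | 22299번: Cipher/generate.py | tokenize_scored
-- ===== SOURCE A (Python) =====
-- from typing import List, Set, Tuple
--
-- def is_letter(ch: str) -> bool:
--     return ('A' <= ch <= 'Z') or ('a' <= ch <= 'z')
--
-- def tokenize_scored(plain: str, good: Set[str], bad: Set[str]) -> Tuple[int, int, int]:
--     i = 0
--     n = len(plain)
--     total = 0
--     matches = 0
--     threats = 0
--     while i < n:
--         if is_letter(plain[i]):
--             j = i
--             while j < n and is_letter(plain[j]):
--                 j += 1
--             length = j - i
--             if 1 <= length <= 20: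
--                 word = plain[i:j].lower()
--                 in_bad = word in bad
--                 in_good = word in good
--                 if in_bad or in_good:
--                     matches += 1
--                 if in_bad:
--                     threats += 1
--                 total += 1
--             i = j
--         else:
--             i += 1
--     return matches, threats, total
-- ===== SOURCE B (Python) =====
-- def tokenize_scored(plain, good, bad):
--     words = ''.join(c if ('A' <= c <= 'Z' or 'a' <= c <= 'z') else ' ' for c in plain).split()
--     matches = 0
--     threats = 0
--     total = 0
--     for w in words:
--         if len(w) <= 20:
--             wl = w.lower()
--             in_bad = wl in bad
--             in_good = wl in good
--             if in_bad or in_good: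
--                 matches += 1
--             if in_bad:
--                 threats += 1
--             total += 1
--     return matches, threats, total
-- ===== Notes on version B (the rewrite author's own statement) =====
-- stated objective: idiomatic
-- what changed: B replaces A's manual index-based scan with nested while loops by a materialize-then-fold decomposition: it maps every non-letter to a space, splits the string once into maximal letter runs, and then loops over that word list.
import Mathlib
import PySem

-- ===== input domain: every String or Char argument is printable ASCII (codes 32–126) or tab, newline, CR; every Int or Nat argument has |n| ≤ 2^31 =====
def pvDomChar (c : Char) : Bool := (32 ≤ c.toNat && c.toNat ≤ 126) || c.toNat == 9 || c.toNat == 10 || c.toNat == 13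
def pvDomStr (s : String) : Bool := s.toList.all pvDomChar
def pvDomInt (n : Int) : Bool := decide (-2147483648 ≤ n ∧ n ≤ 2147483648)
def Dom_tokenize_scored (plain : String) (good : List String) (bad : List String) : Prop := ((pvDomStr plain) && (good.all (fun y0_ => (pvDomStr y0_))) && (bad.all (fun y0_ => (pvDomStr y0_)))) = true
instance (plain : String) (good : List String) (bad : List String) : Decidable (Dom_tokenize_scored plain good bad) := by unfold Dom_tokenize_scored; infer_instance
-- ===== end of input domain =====

-- B replaces A's manual index scan (outer while + inner letter-run while) with a materialize-then-fold
-- decomposition: map every non-letter to a space, split the string once into words, fold over the word list.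


-- ===== PORT A =====
-- is_letter(ch)
def pvLetter (ch : Char) : Bool :=
  (decide ('A' ≤ ch) && decide (ch ≤ 'Z')) || (decide ('a' ≤ ch) && decide (ch ≤ 'z'))

-- the inner `while j < n and is_letter(plain[j]): j += 1`
-- (j is always in range when read, so Nat indexing with getD is exact here)
def tsScan (cs : List Char) (n j : Nat) : Nat :=
  if h : j < n ∧ pvLetter (cs.getD j ' ') = true then tsScan cs n (j + 1) else j
termination_by n - j
decreasing_by omega

theorem tsScan_ge (cs : List Char) (n j : Nat) : j ≤ tsScan cs n j := by
  fun_induction tsScan <;> omega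

-- the outer `while i < n:` loop; state = (i, total, matches, threats)
def tsLoop (cs : List Char) (good bad : List String) (n i : Nat)
    (total mts thr : Int) : Int × Int × Int :=
  if hi : i < n then
    if hl : pvLetter (cs.getD i ' ') = true then
      let j := tsScan cs n i
      let length := j - i
      if 1 ≤ length ∧ length ≤ 20 then
        let word := String.ofList (PySem.Chars.lower (PySem.List.slice cs (some (i : Int)) (some (j : Int))))
        let in_bad := bad.contains word
        let in_good := good.contains word
        let mts := if in_bad || in_good then mts + 1 else mts
        let thr := if in_bad then thr + 1 else thr
        tsLoop cs good bad n j (total + 1) mts thr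
      else tsLoop cs good bad n j total mts thr
    else tsLoop cs good bad n (i + 1) total mts thr
  else (mts, thr, total)
termination_by n - i
decreasing_by
  · have : i + 1 ≤ tsScan cs n i := by
      rw [tsScan]; simp only [hi, hl, and_self]; exact tsScan_ge cs n (i + 1)
    omega
  · have : i + 1 ≤ tsScan cs n i := by
      rw [tsScan]; simp only [hi, hl, and_self]; exact tsScan_ge cs n (i + 1)
    omega
  · omega

def tokenize_scored (plain : String) (good : List String) (bad : List String) : Int × Int × Int :=
  tsLoop plain.toList good bad plain.toList.length 0 0 0 0

-- ===== PORT B =====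
def altLetter (c : Char) : Bool :=
  (decide ('A' ≤ c) && decide (c ≤ 'Z')) || (decide ('a' ≤ c) && decide (c ≤ 'z'))

-- the body of B's `for w in words:` loop; acc = (matches, threats, total)
def altStep (good bad : List String) (acc : Int × Int × Int) (w : String) : Int × Int × Int :=
  if PySem.Str.len w ≤ 20 then
    let wl := PySem.Str.lower w
    let in_bad := bad.contains wl
    let in_good := good.contains wl
    (if in_bad || in_good then acc.1 + 1 else acc.1,
     if in_bad then acc.2.1 + 1 else acc.2.1,
     acc.2.2 + 1)
  else acc

def tokenize_scored_alt (plain : String) (good : List String) (bad : List String) : Int × Int × Int :=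
  let words := PySem.Str.split₀ (String.ofList (plain.toList.map (fun c => if altLetter c then c else ' ')))
  words.foldl (altStep good bad) (0, 0, 0)

-- ===== PRECONDITION & SPEC =====
def Spec_tokenize_scored (plain : String) (good : List String) (bad : List String) (out : Int × Int × Int) : Prop := out = tokenize_scored_alt plain good bad
instance (plain : String) (good : List String) (bad : List String) (out : Int × Int × Int) : Decidable (Spec_tokenize_scored plain good bad out) := by unfold Spec_tokenize_scored; infer_instance

-- ===== CLAIM (what is proved, stated in full; the proofs are below) =====
def Claim_equal_tokenize_scored : Prop := ∀ (plain : String) (good : List String) (bad : List String), Dom_tokenize_scored plain good bad → Spec_tokenize_scored plain good bad (tokenize_scored plain good bad)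

-- ===== LEMMAS AND PROOFS =====

-- the list of maximal letter runs (proof-side specification of the word list)
def pvWords (l : List Char) : List (List Char) :=
  match l with
  | [] => []
  | c :: rest =>
    if pvLetter c = true then
      (c :: rest.takeWhile pvLetter) :: pvWords (rest.dropWhile pvLetter)
    else pvWords rest
termination_by l.length
decreasing_by
  · have := List.length_dropWhile_le pvLetter rest; simp; omega
  · simp

theorem pvWords_nil : pvWords [] = [] := by rw [pvWords.eq_def]

theorem pvWords_cons_pos {c : Char} {rest : List Char} (h : pvLetter c = true) :
    pvWords (c :: rest) = (c :: rest.takeWhile pvLetter) :: pvWords (rest.dropWhile pvLetter) := by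
  rw [pvWords.eq_def]; simp [h]

theorem pvWords_cons_neg {c : Char} {rest : List Char} (h : ¬ pvLetter c = true) :
    pvWords (c :: rest) = pvWords rest := by
  rw [pvWords.eq_def]; simp [h]

-- proof-side step on raw char-list words; acc = (matches, threats, total)
def wstep (good bad : List String) (acc : Int × Int × Int) (w : List Char) : Int × Int × Int :=
  if w.length ≤ 20 then
    let word := String.ofList (PySem.Chars.lower w)
    let in_bad := bad.contains word
    let in_good := good.contains word
    (if in_bad || in_good then acc.1 + 1 else acc.1,
     if in_bad then acc.2.1 + 1 else acc.2.1,
     acc.2.2 + 1)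
  else acc

theorem altStep_ofList (good bad : List String) (acc : Int × Int × Int) (w : List Char) :
    altStep good bad acc (String.ofList w) = wstep good bad acc w := by
  unfold altStep wstep PySem.Str.lower PySem.Str.len
  simp only [String.toList_ofList]
  by_cases h : w.length ≤ 20
  · simp [h]
  · have : ¬ ((w.length : Int) ≤ 20) := by exact_mod_cast h
    simp [h, this]

theorem pvLetter_toNat {c : Char} (h : pvLetter c = true) :
    (65 ≤ c.toNat ∧ c.toNat ≤ 90) ∨ (97 ≤ c.toNat ∧ c.toNat ≤ 122) := by
  unfold pvLetter at h
  simp only [Bool.or_eq_true, Bool.and_eq_true, decide_eq_true_eq, Char.le_def] at h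
  rcases h with ⟨h1, h2⟩ | ⟨h1, h2⟩
  · left; exact ⟨h1, h2⟩
  · right; exact ⟨h1, h2⟩

theorem letter_not_space {c : Char} (h : pvLetter c = true) : PySem.Chars.isspace c = false := by
  have hb := pvLetter_toNat h
  unfold PySem.Chars.isspace
  simp only [Bool.or_eq_false_iff, Bool.and_eq_false_iff, decide_eq_false_iff_not]
  omega

theorem space_isspace : PySem.Chars.isspace ' ' = true := by decide


theorem dropWhile_head_false {p : Char → Bool} :
    ∀ (l : List Char) (d : Char) (ds : List Char), l.dropWhile p = d :: ds → p d = false := by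
  intro l
  induction l with
  | nil => intro d ds h; simp [List.dropWhile] at h
  | cons c rest ih =>
    intro d ds h
    by_cases hc : p c = true
    · rw [List.dropWhile_cons_of_pos hc] at h; exact ih _ _ h
    · rw [List.dropWhile_cons_of_neg hc] at h
      cases h; simpa using hc

-- feeding a letter run (mapped through the space substitution) to split₀.go accumulates it into cur
theorem go_run (run : List Char) (h : ∀ c ∈ run, pvLetter c = true) :
    ∀ (tl cur : List Char) (acc : List (List Char)),
    PySem.Chars.split₀.go ((run ++ tl).map (fun c => if altLetter c then c else ' ')) cur acc
      = PySem.Chars.split₀.go (tl.map (fun c => if altLetter c then c else ' ')) (run.reverse ++ cur) acc := by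
  induction run with
  | nil => intro tl cur acc; simp
  | cons c rs ih =>
    intro tl cur acc
    have hc : pvLetter c = true := h c (by simp)
    have hrs : ∀ x ∈ rs, pvLetter x = true := fun x hx => h x (by simp [hx])
    have hc' : altLetter c = true := hc
    simp only [List.cons_append, List.map_cons, hc', if_pos]
    rw [PySem.Chars.split₀.go]
    simp only [letter_not_space hc, Bool.false_eq_true, ite_false]
    rw [ih hrs tl (c :: cur) acc]
    simp

-- split₀ applied to the space-substituted string yields exactly the maximal letter runs
theorem go_words : ∀ (N : Nat) (l : List Char), l.length ≤ N → ∀ (acc : List (List Char)),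
    PySem.Chars.split₀.go (l.map (fun c => if altLetter c then c else ' ')) [] acc
      = acc.reverse ++ pvWords l := by
  intro N
  induction N with
  | zero =>
    intro l hl acc
    have : l = [] := List.length_eq_zero_iff.mp (Nat.le_zero.mp hl)
    subst this
    rw [List.map_nil, PySem.Chars.split₀.go.eq_def, pvWords_nil]
    simp
  | succ N ih =>
    intro l hl acc
    match l with
    | [] =>
      rw [List.map_nil, PySem.Chars.split₀.go.eq_def, pvWords_nil]; simp
    | c :: rest =>
      by_cases hc : pvLetter c = true
      · have hrun : ∀ x ∈ c :: rest.takeWhile pvLetter, pvLetter x = true := by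
          intro x hx
          rcases List.mem_cons.mp hx with rfl | hx
          · exact hc
          · exact List.mem_takeWhile_imp hx
        have hdecomp : c :: rest = (c :: rest.takeWhile pvLetter) ++ rest.dropWhile pvLetter := by
          simp [List.takeWhile_append_dropWhile]
        conv_lhs => rw [hdecomp]
        rw [go_run _ hrun]
        cases hD : rest.dropWhile pvLetter with
        | nil =>
          rw [List.map_nil, PySem.Chars.split₀.go.eq_def, pvWords_cons_pos hc, hD, pvWords_nil]
          simp
        | cons d ds =>
          have hd : pvLetter d = false := dropWhile_head_false rest d ds hD
          have hds : ds.length ≤ N := by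
            have h1 := List.length_dropWhile_le pvLetter rest
            rw [hD] at h1
            simp only [List.length_cons] at h1 hl
            omega
          have hd' : altLetter d = false := hd
          simp only [List.map_cons, hd', Bool.false_eq_true, ite_false]
          rw [PySem.Chars.split₀.go]
          simp only [space_isspace, if_pos, List.append_nil]
          rw [if_neg (by simp)]
          rw [ih ds hds, pvWords_cons_pos hc, hD, pvWords_cons_neg (by simp [hd])]
          simp
      · have hc' : altLetter c = false := by simpa using hc
        rw [List.map_cons]
        simp only [hc', Bool.false_eq_true, ite_false]
        rw [PySem.Chars.split₀.go]
        simp only [space_isspace, if_pos, List.isEmpty_nil]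
        rw [ih rest (by simp only [List.length_cons] at hl; omega), pvWords_cons_neg hc]

theorem tsScan_spec : ∀ (N : Nat) (cs : List Char) (i : Nat), cs.length - i ≤ N → i ≤ cs.length →
    tsScan cs cs.length i = i + ((cs.drop i).takeWhile pvLetter).length := by
  intro N
  induction N with
  | zero =>
    intro cs i hN hi
    have hie : i = cs.length := by omega
    rw [tsScan]
    simp [hie, List.drop_length]
  | succ N ih =>
    intro cs i hN hi
    by_cases hlt : i < cs.length
    · have hg : cs.getD i ' ' = cs[i] := List.getD_eq_getElem cs ' ' hlt
      have hdrop : cs.drop i = cs[i] :: cs.drop (i + 1) := List.drop_eq_getElem_cons hlt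
      by_cases hl : pvLetter cs[i] = true
      · rw [tsScan]
        rw [dif_pos ⟨hlt, by rw [hg]; exact hl⟩]
        rw [ih cs (i + 1) (by omega) (by omega)]
        rw [hdrop, List.takeWhile_cons_of_pos hl]
        simp; omega
      · rw [tsScan]
        rw [dif_neg (by rw [hg]; simp [hl])]
        rw [hdrop, List.takeWhile_cons_of_neg (by simp [hl])]
        simp
    · have hie : i = cs.length := by omega
      rw [tsScan]
      simp [hie, List.drop_length]

theorem tsLoop_words (good bad : List String) : ∀ (N : Nat) (cs : List Char) (i : Nat),
    cs.length - i ≤ N → i ≤ cs.length → ∀ (t m th : Int),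
    tsLoop cs good bad cs.length i t m th = (pvWords (cs.drop i)).foldl (wstep good bad) (m, th, t) := by
  intro N
  induction N with
  | zero =>
    intro cs i hN hi t m th
    have hie : i = cs.length := by omega
    rw [tsLoop]
    simp [hie, List.drop_length, pvWords_nil]
  | succ N ih =>
    intro cs i hN hi t m th
    by_cases hlt : i < cs.length
    · have hg : cs.getD i ' ' = cs[i] := List.getD_eq_getElem cs ' ' hlt
      have hdrop : cs.drop i = cs[i] :: cs.drop (i + 1) := List.drop_eq_getElem_cons hlt
      by_cases hl : pvLetter cs[i] = true
      · -- letter branch: j jumps over the run R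
        have hscan : tsScan cs cs.length i = i + ((cs.drop i).takeWhile pvLetter).length :=
          tsScan_spec (cs.length - i) cs i (by omega) (by omega)
        set R := (cs.drop i).takeWhile pvLetter with hR
        set D := (cs.drop i).dropWhile pvLetter with hD
        have hRD : R ++ D = cs.drop i := List.takeWhile_append_dropWhile
        have hR1 : 1 ≤ R.length := by
          rw [hR, hdrop, List.takeWhile_cons_of_pos hl]; simp
        have hRle : i + R.length ≤ cs.length := by
          have : R.length + D.length = cs.length - i := by
            have := congrArg List.length hRD; simpa [List.length_drop] using this
          omega
        have hslice : PySem.List.slice cs (some (i : Int)) (some ((i + R.length : Nat) : Int)) = R := by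
          rw [PySem.List.slice_natCast]
          have : i + R.length - i = R.length := by omega
          rw [this]
          calc List.take R.length (cs.drop i) = List.take R.length (R ++ D) := by rw [hRD]
            _ = R := List.take_left
        have hdropj : cs.drop (i + R.length) = D := by
          calc cs.drop (i + R.length) = (cs.drop i).drop R.length := by rw [List.drop_drop]
            _ = (R ++ D).drop R.length := by rw [hRD]
            _ = D := List.drop_left
        have hwords : pvWords (cs.drop i) = R :: pvWords D := by
          rw [hdrop, pvWords_cons_pos hl, hR, hD, hdrop]
          rw [List.takeWhile_cons_of_pos hl, List.dropWhile_cons_of_pos hl]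
        rw [tsLoop]
        rw [dif_pos hlt, dif_pos (by rw [hg]; exact hl)]
        simp only [hscan]
        have hlen : i + R.length - i = R.length := by omega
        rw [hwords, List.foldl_cons]
        by_cases h20 : R.length ≤ 20
        · rw [if_pos (by rw [hlen]; omega)]
          rw [hslice]
          rw [ih cs (i + R.length) (by omega) hRle]
          rw [hdropj]
          congr 1
          rw [wstep, if_pos h20]
        · rw [if_neg (by rw [hlen]; omega)]
          rw [ih cs (i + R.length) (by omega) hRle]
          rw [hdropj]
          congr 1
          rw [wstep, if_neg h20]
      · rw [tsLoop]
        rw [dif_pos hlt, dif_neg (by rw [hg]; simp [hl])]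
        rw [ih cs (i + 1) (by omega) (by omega)]
        congr 1
        rw [hdrop, pvWords_cons_neg hl]
    · have hie : i = cs.length := by omega
      rw [tsLoop]
      simp [hie, List.drop_length, pvWords_nil]

theorem foldl_altStep_ofList (good bad : List String) (ws : List (List Char)) :
    ∀ (acc : Int × Int × Int),
    ws.foldl (fun a w => altStep good bad a (String.ofList w)) acc = ws.foldl (wstep good bad) acc := by
  induction ws with
  | nil => intro acc; rfl
  | cons w ws ih => intro acc; simp only [List.foldl_cons, altStep_ofList]

-- ===== VERDICT (by name: the statement is the Claim_ definition above) =====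
theorem tokenize_scored_spec : Claim_equal_tokenize_scored := by
  intro plain good bad _
  unfold Spec_tokenize_scored tokenize_scored tokenize_scored_alt
  set cs := plain.toList with hcs
  have hA : tsLoop cs good bad cs.length 0 0 0 0 = (pvWords cs).foldl (wstep good bad) (0, 0, 0) := by
    have := tsLoop_words good bad cs.length cs 0 (by omega) (by omega) 0 0 0
    simpa using this
  have hB : PySem.Str.split₀ (String.ofList (cs.map (fun c => if altLetter c then c else ' ')))
      = (pvWords cs).map String.ofList := by
    unfold PySem.Str.split₀ PySem.Chars.split₀
    rw [String.toList_ofList]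
    rw [go_words cs.length cs le_rfl []]
    simp
  rw [hA, hB, List.foldl_map, foldl_altStep_ofList]
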